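-- pv_equiv track=rewrite | github.com/byron123t/cookie-consent | ooutil/consent/consistency/cookie_pref_match.py | replace_suffix_with_qm
-- ===== SOURCE A (Python) =====
-- def replace_suffix_with_qm(astr, suffix_char):
--     astr = list(astr)
--     i = len(astr) - 1
--     while i >= 0:
--         if astr[i] == suffix_char:
--             astr[i] = '?'
--             i -= 1
--         else:
--             break
--     return ''.join(astr)
-- ===== SOURCE B (Python) =====
-- def replace_suffix_with_qm(astr, suffix_char):
--     last_non = -1
--     for i, ch in enumerate(astr):
--         if ch != suffix_char:
--             last_non = i
--     return astr[:last_non + 1] + '?' * (len(astr) - last_non - 1)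
-- ===== Notes on version B (the rewrite author's own statement) =====
-- stated objective: alternative
-- what changed: Replaced the backward in-place list mutation with early break by a forward pass that tracks the index of the last character differing from suffix_char, then builds the result as prefix-slice plus a run of '?'.
import Mathlib
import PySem

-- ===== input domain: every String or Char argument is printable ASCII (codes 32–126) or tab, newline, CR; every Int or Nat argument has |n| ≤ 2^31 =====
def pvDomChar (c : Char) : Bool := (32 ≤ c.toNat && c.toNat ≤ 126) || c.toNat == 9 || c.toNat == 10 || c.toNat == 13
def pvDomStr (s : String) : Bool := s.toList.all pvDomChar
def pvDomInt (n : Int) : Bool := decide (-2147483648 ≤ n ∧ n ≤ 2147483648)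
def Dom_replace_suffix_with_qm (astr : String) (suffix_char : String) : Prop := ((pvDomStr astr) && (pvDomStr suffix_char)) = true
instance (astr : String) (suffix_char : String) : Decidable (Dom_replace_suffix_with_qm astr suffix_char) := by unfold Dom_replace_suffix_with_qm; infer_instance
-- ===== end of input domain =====

-- B replaces A's backward in-place mutation (with early break) by a forward scan tracking the
-- last index whose character differs from suffix_char, then slice + '?'-run; objective: alternative.

-- ===== PORT A =====
-- the while loop walks the char list from the right, rewriting chars to '?' until the first mismatch
def pvLoopA (sc : String) : List Char → List Char
  | [] => []
  | c :: rest => if [c] = sc.toList then '?' :: pvLoopA sc rest else c :: rest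

def replace_suffix_with_qm (astr : String) (suffix_char : String) : String :=
  String.ofList (pvLoopA suffix_char astr.toList.reverse).reverse

-- ===== PORT B =====
def replace_suffix_with_qm_alt (astr : String) (suffix_char : String) : String :=
  let l := astr.toList
  let last_non : Int :=
    (PySem.List.enumerate l 0).foldl
      (fun acc p => if ¬ ([p.2] = suffix_char.toList) then p.1 else acc) (-1)
  String.ofList (PySem.List.slice l none (some (last_non + 1)) ++
    List.replicate ((l.length : Int) - last_non - 1).toNat '?')

-- ===== PRECONDITION & SPEC =====
def Spec_replace_suffix_with_qm (astr : String) (suffix_char : String) (out : String) : Prop := out = replace_suffix_with_qm_alt astr suffix_char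
instance (astr : String) (suffix_char : String) (out : String) : Decidable (Spec_replace_suffix_with_qm astr suffix_char out) := by unfold Spec_replace_suffix_with_qm; infer_instance

-- ===== CLAIM (what is proved, stated in full; the proofs are below) =====
def Claim_equal_replace_suffix_with_qm : Prop := ∀ (astr : String) (suffix_char : String), Dom_replace_suffix_with_qm astr suffix_char → Spec_replace_suffix_with_qm astr suffix_char (replace_suffix_with_qm astr suffix_char)

-- ===== LEMMAS AND PROOFS =====

lemma length_takeWhile_le' (q : Char → Bool) (l : List Char) :
    (l.takeWhile q).length ≤ l.length :=
  List.IsPrefix.length_le (List.takeWhile_prefix q)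

-- A's loop is: '?'-out the run of matching chars at the head (of the reversed list), keep the rest
lemma pvLoopA_eq (sc : String) (r : List Char) :
    pvLoopA sc r = (r.takeWhile (fun c => [c] = sc.toList)).map (fun _ => '?')
      ++ r.dropWhile (fun c => [c] = sc.toList) := by
  induction r with
  | nil => rfl
  | cons c rest ih =>
    by_cases h : [c] = sc.toList <;>
      simp [pvLoopA, List.takeWhile, List.dropWhile, h, ih]

lemma enumerate_append_singleton {α : Type} (l : List α) (c : α) (s : Int) :
    PySem.List.enumerate (l ++ [c]) s
      = PySem.List.enumerate l s ++ [(s + l.length, c)] := by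
  induction l generalizing s with
  | nil => simp [PySem.List.enumerate_nil, PySem.List.enumerate_cons]
  | cons x xs ih =>
    simp [PySem.List.enumerate_cons, ih]
    ring_nf

-- B's fold computes len - t - 1 where t is the length of the trailing run of matching chars
lemma fold_last_non (q : Char → Bool) (l : List Char) (s a : Int) :
    (PySem.List.enumerate l s).foldl
        (fun acc p => if q p.2 then acc else p.1) a
      = if (l.reverse.takeWhile q).length = l.length
        then a
        else s + l.length - (l.reverse.takeWhile q).length - 1 := by
  induction l using List.reverseRecOn with
  | nil => simp [PySem.List.enumerate_nil]
  | append_singleton xs c ih =>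
    rw [enumerate_append_singleton, List.foldl_append, ih]
    have hrev : (xs ++ [c]).reverse = c :: xs.reverse := by simp
    rw [hrev, List.takeWhile_cons]
    have ht : (xs.reverse.takeWhile q).length ≤ xs.length := by
      have := length_takeWhile_le' q xs.reverse
      simpa using this
    by_cases hc : q c = true
    · by_cases h : (xs.reverse.takeWhile q).length = xs.length <;>
        simp [hc, h] <;> omega
    · have hc' : q c = false := by simpa using hc
      simp [hc']
      omega

lemma takeWhile_dropWhile_reverse (p : Char → Bool) (l : List Char) :
    l.take (l.length - (l.reverse.takeWhile p).length) = (l.reverse.dropWhile p).reverse := by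
  set tw := l.reverse.takeWhile p with htw
  set d := l.reverse.dropWhile p with hd
  have hsplit : tw ++ d = l.reverse := List.takeWhile_append_dropWhile
  have h : l = d.reverse ++ tw.reverse := by
    calc l = l.reverse.reverse := (List.reverse_reverse l).symm
      _ = (tw ++ d).reverse := by rw [hsplit]
      _ = _ := by rw [List.reverse_append]
  have hlen : l.length = d.length + tw.length := by
    have := congrArg List.length hsplit
    rw [List.length_append, List.length_reverse] at this
    omega
  have hn : l.length - tw.length = d.reverse.length := by
    rw [List.length_reverse]
    omega
  rw [hn, h]
  exact List.take_left' rfl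

lemma main_eq (astr sc : String) :
    replace_suffix_with_qm astr sc = replace_suffix_with_qm_alt astr sc := by
  simp only [replace_suffix_with_qm, replace_suffix_with_qm_alt, ite_not]
  rw [pvLoopA_eq]
  set l := astr.toList with hl
  set q : Char → Bool := fun c => decide ([c] = sc.toList) with hq
  set t := (l.reverse.takeWhile q).length with htd
  have ht : t ≤ l.length := by
    have := length_takeWhile_le' q l.reverse
    rw [List.length_reverse] at this
    omega
  have hfun : (fun (acc : Int) (p : Int × Char) => if [p.2] = sc.toList then acc else p.1)
      = (fun (acc : Int) (p : Int × Char) => if q p.2 then acc else p.1) := by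
    funext acc p; simp [hq]
  rw [hfun, fold_last_non q l 0 (-1)]
  have hfold : (if (l.reverse.takeWhile q).length = l.length
      then (-1 : Int)
      else (0 : Int) + l.length - (l.reverse.takeWhile q).length - 1)
      = (l.length : Int) - t - 1 := by
    by_cases h : t = l.length <;> simp [← htd, h] <;> omega
  rw [hfold]
  have h1 : ((l.length : Int) - t - 1 + 1) = ((l.length - t : Nat) : Int) := by omega
  have h2 : ((l.length : Int) - ((l.length : Int) - t - 1) - 1).toNat = t := by omega
  rw [h1, h2, PySem.List.slice_to_natCast]
  rw [takeWhile_dropWhile_reverse q l]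
  congr 1
  rw [List.reverse_append]
  congr 1
  rw [← List.map_reverse]
  simp
  exact htd.symm

-- ===== VERDICT (by name: the statement is the Claim_ definition above) =====
theorem replace_suffix_with_qm_spec : Claim_equal_replace_suffix_with_qm := by
  intro astr sc _
  unfold Spec_replace_suffix_with_qm
  exact main_eq astr sc
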